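-- pv_equiv track=rewrite | github.com/GMainardi/Advent-2023 | day14/b.py | gravity_up
-- ===== SOURCE A (Python) =====
-- def gravity_up(moving_rocks, static_rocks, col):
--
--     floors = [-1] + [x[0] for x in static_rocks if x[1] == col]
--     floors.sort()
--
--     rocks = [x[0] for x in moving_rocks if x[1] == col]
--     rocks.sort()
--
--     floor_idx = 0
--     new_rocks = []
--
--     for rock in rocks:
--
--         while floor_idx+1 < len(floors) and rock > floors[floor_idx+1]:
--             floor_idx += 1
--
--         floors[floor_idx] += 1
--         new_rocks.append((floors[floor_idx], col))
--
--     return set(new_rocks)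
-- ===== SOURCE B (Python) =====
-- def gravity_up(moving_rocks, static_rocks, col):
--     # Floor levels in this column (with the -1 sentinel), ascending.
--     floors = sorted([-1] + [r for r, c in static_rocks if c == col])
--     rocks = [r for r, c in moving_rocks if c == col]
--     res = set()
--     for i, f in enumerate(floors):
--         # rocks that settle on floor slot i: those in (floors[i], floors[i+1]]
--         # (the lowest slot also collects everything at or below its level)
--         c = sum(1 for r in rocks
--                 if (i == 0 or r > f) and (i + 1 == len(floors) or r <= floors[i + 1]))
--         for k in range(1, c + 1):
--             res.add((f + k, col))
--     return res
-- ===== Notes on version B (the rewrite author's own statement) =====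
-- stated objective: alternative
-- what changed: A simulates gravity with a mutable floors list and an advancing floor-index cursor over the sorted rocks; B independently counts, for each floor slot, the rocks whose row falls in that slot's half-open interval and emits each pile directly from the count, with no mutation, no cursor and no sorting of the rocks.
import Mathlib
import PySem

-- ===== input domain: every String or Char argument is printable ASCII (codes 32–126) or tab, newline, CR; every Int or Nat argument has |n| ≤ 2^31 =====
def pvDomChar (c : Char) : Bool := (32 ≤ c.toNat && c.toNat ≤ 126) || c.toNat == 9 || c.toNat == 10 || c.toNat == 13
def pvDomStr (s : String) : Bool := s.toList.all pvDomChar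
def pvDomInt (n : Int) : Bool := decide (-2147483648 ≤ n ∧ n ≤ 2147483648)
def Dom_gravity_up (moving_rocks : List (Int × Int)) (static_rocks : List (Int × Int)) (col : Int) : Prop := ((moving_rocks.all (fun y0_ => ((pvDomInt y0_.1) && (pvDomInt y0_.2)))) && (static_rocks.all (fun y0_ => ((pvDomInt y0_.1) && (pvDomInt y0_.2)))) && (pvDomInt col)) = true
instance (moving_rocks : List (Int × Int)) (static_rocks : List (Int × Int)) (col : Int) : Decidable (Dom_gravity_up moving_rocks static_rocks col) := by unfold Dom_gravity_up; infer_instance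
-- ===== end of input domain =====

-- B replaces A's stateful scan (mutable floors list + advancing floor index) by an
-- independent per-floor-slot count of the rocks falling into each slot's half-open
-- interval, emitting each slot's pile directly (objective: alternative decomposition).
-- Both programs return a Python set; the ports compare the PySem.Set values.

-- ===== PORT A =====
-- the `while` loop advancing floor_idx
def pvAdvance (fl : List Int) (rock : Int) (idx : Nat) : Nat :=
  if _h : idx + 1 < fl.length ∧ fl.getD (idx + 1) 0 < rock then pvAdvance fl rock (idx + 1)
  else idx
termination_by fl.length - idx

-- the body of A's `for rock in rocks` loop
def pvStepA (col : Int) (st : List Int × Nat × List (Int × Int)) (rock : Int) :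
    List Int × Nat × List (Int × Int) :=
  let idx := pvAdvance st.1 rock st.2.1
  let v := st.1.getD idx 0 + 1
  (st.1.set idx v, idx, st.2.2 ++ [(v, col)])

def gravity_up (moving_rocks : List (Int × Int)) (static_rocks : List (Int × Int)) (col : Int) : List (Int × Int) :=
  let floors := PySem.List.sorted ((-1 : Int) :: (static_rocks.filter (fun x => x.2 == col)).map (fun x => x.1)) (fun x => x) false
  let rocks := PySem.List.sorted ((moving_rocks.filter (fun x => x.2 == col)).map (fun x => x.1)) (fun x => x) false
  let fin := rocks.foldl (pvStepA col) (floors, 0, ([] : List (Int × Int)))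
  PySem.Set.ofList fin.2.2

-- ===== PORT B =====
def gravity_up_alt (moving_rocks : List (Int × Int)) (static_rocks : List (Int × Int)) (col : Int) : List (Int × Int) :=
  let floors := PySem.List.sorted ((-1 : Int) :: (static_rocks.filter (fun x => x.2 == col)).map (fun x => x.1)) (fun x => x) false
  let rocks := (moving_rocks.filter (fun x => x.2 == col)).map (fun x => x.1)
  (PySem.List.enumerate floors 0).foldl
    (fun res p =>
      let c := (rocks.filter (fun r =>
        (p.1 == 0 || p.2 < r) && (p.1 + 1 == (floors.length : Int) || r ≤ PySem.List.pyGetD floors (p.1 + 1) 0))).length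
      (PySem.List.pyRange 1 ((c : Int) + 1) 1).foldl (fun res k => PySem.Set.add res (p.2 + k, col)) res)
    PySem.Set.empty

-- ===== PRECONDITION & SPEC =====
def Spec_gravity_up (moving_rocks : List (Int × Int)) (static_rocks : List (Int × Int)) (col : Int) (out : List (Int × Int)) : Prop := out = gravity_up_alt moving_rocks static_rocks col
instance (moving_rocks : List (Int × Int)) (static_rocks : List (Int × Int)) (col : Int) (out : List (Int × Int)) : Decidable (Spec_gravity_up moving_rocks static_rocks col out) := by unfold Spec_gravity_up; infer_instance

-- ===== CLAIM (what is proved, stated in full; the proofs are below) =====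
def Claim_equal_gravity_up : Prop := ∀ (moving_rocks : List (Int × Int)) (static_rocks : List (Int × Int)) (col : Int), Dom_gravity_up moving_rocks static_rocks col → Spec_gravity_up moving_rocks static_rocks col (gravity_up moving_rocks static_rocks col)

-- ===== LEMMAS AND PROOFS =====

-- slot of a rock: last index of the sorted floors list whose value is below the rock (0 if none)
def pvTgt (fs : List Int) (r : Int) : Nat := fs.countP (fun f => decide (f < r)) - 1

-- A's emitted pile positions, rock-major (reference form of A's loop output)
def pvEmitA (fs : List Int) : Nat → Nat → List Int → List Int
  | _, _, [] => []
  | idx, m, r :: rs =>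
    let t := pvTgt fs r
    if t = idx then (fs.getD idx 0 + m + 1) :: pvEmitA fs idx (m + 1) rs
    else (fs.getD t 0 + 1) :: pvEmitA fs t 1 rs

-- number of rocks landing on slot i
def pvCnt (fs rs : List Int) (i : Nat) : Nat := rs.countP (fun r => decide (pvTgt fs r = i))

theorem pvPrefix (fs : List Int) (hs : fs.Pairwise (· ≤ ·)) (r : Int) :
    ∀ j, j < fs.length → (fs.getD j 0 < r ↔ j < fs.countP (fun f => decide (f < r))) := by
  induction fs with
  | nil => intro j hj; simp at hj
  | cons f fs ih =>
    rcases List.pairwise_cons.1 hs with ⟨hf, hs'⟩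
    have hz : ¬ f < r → fs.countP (fun f => decide (f < r)) = 0 := by
      intro hnot
      apply List.countP_eq_zero.2
      intro x hx
      simp only [decide_eq_true_eq]
      have := hf x hx
      omega
    intro j hj
    cases j with
    | zero =>
      simp only [List.getD_cons_zero, List.countP_cons]
      by_cases hfr : f < r
      · simp [hfr]
      · simp [hfr, hz hfr]
    | succ j =>
      simp only [List.getD_cons_succ, List.countP_cons, List.length_cons] at *
      rw [ih hs' j (by omega)]
      by_cases hfr : f < r
      · simp [hfr]
      · simp [hfr, hz hfr]

theorem pvTgt_lt (fs : List Int) (hne : fs ≠ []) (r : Int) : pvTgt fs r < fs.length := by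
  have h1 : fs.countP (fun f => decide (f < r)) ≤ fs.length := fs.countP_le_length
  have h2 : 0 < fs.length := List.length_pos_iff.2 hne
  unfold pvTgt
  omega

theorem pvTgt_char (fs : List Int) (hs : fs.Pairwise (· ≤ ·)) (hne : fs ≠ []) (r : Int)
    (i : Nat) (hi : i < fs.length) :
    (pvTgt fs r = i) ↔ ((i = 0 ∨ fs.getD i 0 < r) ∧ (i + 1 = fs.length ∨ r ≤ fs.getD (i + 1) 0)) := by
  have hcle : fs.countP (fun f => decide (f < r)) ≤ fs.length := fs.countP_le_length
  unfold pvTgt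
  constructor
  · intro ht
    refine ⟨?_, ?_⟩
    · by_cases hi0 : i = 0
      · exact Or.inl hi0
      · exact Or.inr ((pvPrefix fs hs r i hi).2 (by omega))
    · by_cases he : i + 1 = fs.length
      · exact Or.inl he
      · have h2 : i + 1 < fs.length := by omega
        have hnot : ¬ (i + 1 < fs.countP (fun f => decide (f < r))) := by omega
        have hnlt : ¬ fs.getD (i + 1) 0 < r :=
          fun hlt => hnot ((pvPrefix fs hs r (i + 1) h2).1 hlt)
        exact Or.inr (le_of_not_gt hnlt)
  · rintro ⟨h1, h2⟩
    have hub : fs.countP (fun f => decide (f < r)) ≤ i + 1 := by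
      rcases h2 with he | hle
      · omega
      · by_contra hcon
        have hlt : fs.getD (i + 1) 0 < r :=
          (pvPrefix fs hs r (i + 1) (by omega)).2 (by omega)
        omega
    rcases h1 with h0 | hlt
    · subst h0; omega
    · have := (pvPrefix fs hs r i hi).1 hlt
      omega

theorem pvTgt_mono (fs : List Int) {r r' : Int} (h : r ≤ r') : pvTgt fs r ≤ pvTgt fs r' := by
  have : fs.countP (fun f => decide (f < r)) ≤ fs.countP (fun f => decide (f < r')) := by
    apply List.countP_mono_left
    intro x _ hx
    simp only [decide_eq_true_eq] at *
    omega
  unfold pvTgt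
  omega

theorem pvAdvance_eq (fs : List Int) (hs : fs.Pairwise (· ≤ ·)) (hne : fs ≠ []) (r : Int)
    (fl : List Int) (hlen : fl.length = fs.length) :
    ∀ (idx : Nat), (∀ j, idx < j → fl.getD j 0 = fs.getD j 0) → idx ≤ pvTgt fs r →
    pvAdvance fl r idx = pvTgt fs r := by
  have hT := pvTgt_lt fs hne r
  have H : ∀ (d idx : Nat), pvTgt fs r - idx = d →
      (∀ j, idx < j → fl.getD j 0 = fs.getD j 0) → idx ≤ pvTgt fs r →
      pvAdvance fl r idx = pvTgt fs r := by
    intro d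
    induction d with
    | zero =>
      intro idx hd hag hle
      have hidx : idx = pvTgt fs r := by omega
      rw [pvAdvance, dif_neg]
      · exact hidx
      · rintro ⟨hb, hlt⟩
        rw [hag (idx + 1) (by omega)] at hlt
        have := (pvPrefix fs hs r (idx + 1) (by omega)).1 hlt
        unfold pvTgt at hidx hT
        omega
    | succ d ih =>
      intro idx hd hag hle
      have hstep : idx + 1 ≤ pvTgt fs r := by omega
      have hlt : fs.getD (idx + 1) 0 < r := by
        apply (pvPrefix fs hs r (idx + 1) (by omega)).2
        unfold pvTgt at hstep
        omega
      rw [pvAdvance, dif_pos ⟨by omega, by rw [hag (idx + 1) (by omega)]; exact hlt⟩]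
      exact ih (idx + 1) (by omega) (fun j hj => hag j (by omega)) hstep
  intro idx hag hle
  exact H (pvTgt fs r - idx) idx rfl hag hle

theorem pvGetD_set_ne (l : List Int) (i j : Nat) (v : Int) (h : i ≠ j) :
    (l.set i v).getD j 0 = l.getD j 0 := by
  simp [List.getD_eq_getElem?_getD, List.getElem?_set_ne h]

theorem pvGetD_set_self (l : List Int) (i : Nat) (v : Int) (h : i < l.length) :
    (l.set i v).getD i 0 = v := by
  simp [List.getD_eq_getElem?_getD, h]

theorem pvLoopA (fs : List Int) (col : Int) (hs : fs.Pairwise (· ≤ ·)) (hne : fs ≠ []) :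
    ∀ (rs : List Int), rs.Pairwise (· ≤ ·) →
    ∀ (idx m : Nat) (fl : List Int) (acc : List (Int × Int)),
      fl.length = fs.length →
      (∀ j, idx < j → fl.getD j 0 = fs.getD j 0) →
      fl.getD idx 0 = fs.getD idx 0 + m →
      (∀ r ∈ rs, idx ≤ pvTgt fs r) →
      (rs.foldl (pvStepA col) (fl, idx, acc)).2.2
        = acc ++ (pvEmitA fs idx m rs).map (fun v => (v, col)) := by
  intro rs
  induction rs with
  | nil => intro _ idx m fl acc _ _ _ _; simp [pvEmitA]
  | cons r rs ih =>
    intro hp idx m fl acc hlen hag hcur hle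
    rcases List.pairwise_cons.1 hp with ⟨hr, hp'⟩
    have hT := pvTgt_lt fs hne r
    have hadv : pvAdvance fl r idx = pvTgt fs r :=
      pvAdvance_eq fs hs hne r fl hlen idx hag (hle r (List.mem_cons_self))
    simp only [List.foldl_cons]
    by_cases ht : pvTgt fs r = idx
    · have hstep : pvStepA col (fl, idx, acc) r
          = (fl.set idx (fs.getD idx 0 + m + 1), idx, acc ++ [(fs.getD idx 0 + m + 1, col)]) := by
        simp only [pvStepA, hadv, ht, hcur]
      rw [hstep, ih hp' idx (m + 1) _ _ (by simpa using hlen)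
        (fun j hj => by rw [pvGetD_set_ne _ _ _ _ (by omega), hag j hj])
        (by rw [pvGetD_set_self _ _ _ (by omega)]; push_cast; ring)
        (fun r' hr' => by rw [← ht]; exact pvTgt_mono fs (hr r' hr'))]
      simp only [pvEmitA]
      rw [if_pos ht]
      simp [List.append_assoc]
    · have hgt : idx < pvTgt fs r := lt_of_le_of_ne (hle r (List.mem_cons_self)) (fun h => ht h.symm)
      have hval : fl.getD (pvTgt fs r) 0 = fs.getD (pvTgt fs r) 0 := hag _ hgt
      have hstep : pvStepA col (fl, idx, acc) r
          = (fl.set (pvTgt fs r) (fs.getD (pvTgt fs r) 0 + 1), pvTgt fs r,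
             acc ++ [(fs.getD (pvTgt fs r) 0 + 1, col)]) := by
        simp only [pvStepA, hadv, hval]
      rw [hstep, ih hp' (pvTgt fs r) 1 _ _ (by simpa using hlen)
        (fun j hj => by rw [pvGetD_set_ne _ _ _ _ (by omega), hag j (by omega)])
        (by rw [pvGetD_set_self _ _ _ (by omega)]; push_cast; ring)
        (fun r' hr' => pvTgt_mono fs (hr r' hr'))]
      simp only [pvEmitA]
      rw [if_neg ht]
      simp [List.append_assoc]

def pvEmitAt (fs rs : List Int) (i m : Nat) : List Int :=
  (List.range (pvCnt fs rs i)).map (fun k : Nat => (fs.getD i 0 + m + k + 1 : Int))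

theorem pvEmitAt_cons_ne (fs rs : List Int) (r : Int) (i m : Nat) (h : pvTgt fs r ≠ i) :
    pvEmitAt fs (r :: rs) i m = pvEmitAt fs rs i m := by
  simp [pvEmitAt, pvCnt, List.countP_cons, h]

theorem pvEmitAt_cons_self (fs rs : List Int) (r : Int) (i m : Nat) (h : pvTgt fs r = i) :
    pvEmitAt fs (r :: rs) i m = (fs.getD i 0 + m + 1) :: pvEmitAt fs rs i (m + 1) := by
  have hc : pvCnt fs (r :: rs) i = pvCnt fs rs i + 1 := by
    simp [pvCnt, List.countP_cons, h]
  rw [pvEmitAt, hc, List.range_succ_eq_map, List.map_cons, List.map_map]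
  rw [pvEmitAt, List.cons.injEq]
  refine ⟨by push_cast; ring, ?_⟩
  apply List.map_congr_left
  intro k _
  simp only [Function.comp_apply, Nat.succ_eq_add_one]
  push_cast
  ring

theorem pvEmitAt_zero (fs rs : List Int) (i m : Nat) (h : ∀ r ∈ rs, pvTgt fs r ≠ i) :
    pvEmitAt fs rs i m = [] := by
  have hz : pvCnt fs rs i = 0 := by
    apply List.countP_eq_zero.2
    intro r hr
    simp [h r hr]
  simp [pvEmitAt, hz]

theorem pvFlatMap_congr {α β : Type} (l : List α) (f g : α → List β) (h : ∀ i ∈ l, f i = g i) :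
    l.flatMap f = l.flatMap g := by
  induction l with
  | nil => rfl
  | cons a l ih =>
    simp only [List.flatMap_cons, h a List.mem_cons_self,
      ih (fun i hi => h i (List.mem_cons_of_mem a hi))]

theorem pvFlatMap_emitAt_nil (fs rs : List Int) (l : List Nat)
    (h : ∀ i ∈ l, ∀ r ∈ rs, pvTgt fs r ≠ i) :
    l.flatMap (fun i => pvEmitAt fs rs i 0) = [] := by
  apply List.flatMap_eq_nil_iff.2
  intro i hi
  exact pvEmitAt_zero fs rs i 0 (h i hi)

theorem pvEmitA_eq (fs : List Int) (hs : fs.Pairwise (· ≤ ·)) (hne : fs ≠ []) :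
    ∀ (rs : List Int), rs.Pairwise (· ≤ ·) →
    ∀ (idx m : Nat), idx < fs.length →
      (∀ r ∈ rs, idx ≤ pvTgt fs r) →
      pvEmitA fs idx m rs
        = pvEmitAt fs rs idx m
            ++ (List.range' (idx + 1) (fs.length - (idx + 1))).flatMap (fun i => pvEmitAt fs rs i 0) := by
  intro rs
  induction rs with
  | nil =>
    intro _ idx m _ _
    rw [pvEmitA, pvEmitAt_zero fs [] idx m (by simp),
      pvFlatMap_emitAt_nil fs [] _ (by simp)]
    rfl
  | cons r rs ih =>
    intro hp idx m hidx hle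
    rcases List.pairwise_cons.1 hp with ⟨hr, hp'⟩
    have hT := pvTgt_lt fs hne r
    have hge : ∀ r' ∈ rs, pvTgt fs r ≤ pvTgt fs r' := fun r' hr' => pvTgt_mono fs (hr r' hr')
    by_cases ht : pvTgt fs r = idx
    · rw [pvEmitA, if_pos ht, ih hp' idx (m + 1) hidx (fun r' hr' => ht ▸ hge r' hr'),
        pvEmitAt_cons_self fs rs r idx m ht]
      simp only [List.cons_append, List.cons.injEq, true_and]
      congr 1
      apply pvFlatMap_congr
      intro i hi
      rcases List.mem_range'.1 hi with ⟨k, hk, rfl⟩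
      exact (pvEmitAt_cons_ne fs rs r _ 0 (by omega)).symm
    · have hgt : idx < pvTgt fs r := lt_of_le_of_ne (hle r List.mem_cons_self) (fun h => ht h.symm)
      rw [pvEmitA, if_neg ht, ih hp' (pvTgt fs r) 1 hT hge]
      have hsplit : List.range' (idx + 1) (fs.length - (idx + 1))
          = List.range' (idx + 1) (pvTgt fs r - (idx + 1))
            ++ List.range' (pvTgt fs r) (fs.length - pvTgt fs r) := by
        have h2 := List.range'_append (s := idx + 1) (m := pvTgt fs r - (idx + 1))
          (n := fs.length - pvTgt fs r) (step := 1)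
        simp only [Nat.one_mul, one_mul] at h2
        have h3 : idx + 1 + (pvTgt fs r - (idx + 1)) = pvTgt fs r := by omega
        rw [h3] at h2
        have h1 : fs.length - (idx + 1) = (pvTgt fs r - (idx + 1)) + (fs.length - pvTgt fs r) := by
          omega
        rw [h1, ← h2]
      have hhead : List.range' (pvTgt fs r) (fs.length - pvTgt fs r)
          = pvTgt fs r :: List.range' (pvTgt fs r + 1) (fs.length - (pvTgt fs r + 1)) := by
        have h3 : fs.length - pvTgt fs r = (fs.length - (pvTgt fs r + 1)) + 1 := by omega
        rw [h3, List.range'_succ]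
      have hz1 : pvEmitAt fs (r :: rs) idx m = [] := by
        apply pvEmitAt_zero
        intro r' hr'
        rcases List.mem_cons.1 hr' with rfl | h'
        · omega
        · have := hge r' h'
          omega
      have hz2 : (List.range' (idx + 1) (pvTgt fs r - (idx + 1))).flatMap
          (fun i => pvEmitAt fs (r :: rs) i 0) = [] := by
        apply pvFlatMap_emitAt_nil
        intro i hi r' hr'
        rcases List.mem_range'.1 hi with ⟨k, hk, rfl⟩
        rcases List.mem_cons.1 hr' with rfl | h'
        · omega
        · have := hge r' h'
          omega
      rw [hz1, hsplit, List.flatMap_append, hz2, hhead, List.flatMap_cons,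
        pvEmitAt_cons_self fs rs r _ 0 rfl]
      have htail : (List.range' (pvTgt fs r + 1) (fs.length - (pvTgt fs r + 1))).flatMap
            (fun i => pvEmitAt fs (r :: rs) i 0)
          = (List.range' (pvTgt fs r + 1) (fs.length - (pvTgt fs r + 1))).flatMap
            (fun i => pvEmitAt fs rs i 0) := by
        apply pvFlatMap_congr
        intro i hi
        rcases List.mem_range'.1 hi with ⟨k, hk, rfl⟩
        exact pvEmitAt_cons_ne fs rs r _ 0 (by omega)
      rw [htail]
      simp

-- the shared sorted floors list and sorted in-column rocks list
def pvFs (st : List (Int × Int)) (col : Int) : List Int :=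
  PySem.List.sorted ((-1 : Int) :: (st.filter (fun x => x.2 == col)).map (fun x => x.1)) (fun x => x) false

def pvRs (mv : List (Int × Int)) (col : Int) : List Int :=
  PySem.List.sorted ((mv.filter (fun x => x.2 == col)).map (fun x => x.1)) (fun x => x) false

theorem pvFs_ne (st : List (Int × Int)) (col : Int) : pvFs st col ≠ [] := by
  intro h
  have hl : (pvFs st col).length
      = ((-1 : Int) :: (st.filter (fun x => x.2 == col)).map (fun x => x.1)).length :=
    PySem.List.length_sorted _ _ _
  rw [h] at hl
  simp at hl

theorem pvFs_pairwise (st : List (Int × Int)) (col : Int) : (pvFs st col).Pairwise (· ≤ ·) :=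
  PySem.List.sorted_pairwise _ _

theorem pvRs_pairwise (mv : List (Int × Int)) (col : Int) : (pvRs mv col).Pairwise (· ≤ ·) :=
  PySem.List.sorted_pairwise _ _

theorem pvA_form (mv st : List (Int × Int)) (col : Int) :
    gravity_up mv st col
      = PySem.Set.ofList ((pvEmitA (pvFs st col) 0 0 (pvRs mv col)).map (fun v => (v, col))) := by
  show PySem.Set.ofList ((pvRs mv col).foldl (pvStepA col) (pvFs st col, 0, ([] : List (Int × Int)))).2.2 = _
  rw [pvLoopA (pvFs st col) col (pvFs_pairwise st col) (pvFs_ne st col) (pvRs mv col)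
    (pvRs_pairwise mv col) 0 0 (pvFs st col) [] rfl (fun j _ => rfl) (by norm_num)
    (fun r _ => Nat.zero_le _)]
  simp

theorem pvFoldlUpdate {α : Type} (l : List α) (g : α → List (Int × Int)) (s : PySem.Set (Int × Int)) :
    l.foldl (fun s x => PySem.Set.update s (g x)) s = PySem.Set.update s (l.flatMap g) := by
  induction l generalizing s with
  | nil => simp [PySem.Set.update]
  | cons a l ih => simp only [List.foldl_cons, List.flatMap_cons, PySem.Set.update_append, ih]

-- the per-slot list B emits, pointwise equal to pvEmitAt
theorem pvSlot_eq (mv st : List (Int × Int)) (col : Int) (i : Nat) (hi : i < (pvFs st col).length) :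
    ((PySem.List.pyRange 1
        ((((((mv.filter (fun x => x.2 == col)).map (fun x => x.1)).filter (fun r =>
          (((i : Int) == 0) || PySem.List.pyGetD (pvFs st col) (i : Int) 0 < r) &&
          (((i : Int) + 1 == ((pvFs st col).length : Int)) || r ≤ PySem.List.pyGetD (pvFs st col) ((i : Int) + 1) 0))).length : Nat) : Int) + 1) 1).map
      (fun k => (PySem.List.pyGetD (pvFs st col) (i : Int) 0 + k, col)))
      = (pvEmitAt (pvFs st col) (pvRs mv col) i 0).map (fun v => (v, col)) := by
  have hs := pvFs_pairwise st col
  have hne := pvFs_ne st col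
  have hperm : (pvRs mv col).Perm ((mv.filter (fun x => x.2 == col)).map (fun x => x.1)) :=
    PySem.List.sorted_perm _ _ _
  have hgd : PySem.List.pyGetD (pvFs st col) (i : Int) 0 = (pvFs st col).getD i 0 :=
    PySem.List.pyGetD_natCast _ _ _
  have hcast : ((i : Int) + 1) = (((i + 1 : Nat)) : Int) := by push_cast; ring
  have hc : (((mv.filter (fun x => x.2 == col)).map (fun x => x.1)).filter (fun r =>
          (((i : Int) == 0) || PySem.List.pyGetD (pvFs st col) (i : Int) 0 < r) &&
          (((i : Int) + 1 == ((pvFs st col).length : Int)) || r ≤ PySem.List.pyGetD (pvFs st col) ((i : Int) + 1) 0))).length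
        = pvCnt (pvFs st col) (pvRs mv col) i := by
    rw [← List.countP_eq_length_filter, ← hperm.countP_eq, pvCnt]
    apply List.countP_congr
    intro r _
    rw [hgd, hcast, PySem.List.pyGetD_natCast]
    rw [Bool.eq_iff_iff]
    simp only [Bool.and_eq_true, Bool.or_eq_true, beq_iff_eq, decide_eq_true_eq,
      Nat.cast_eq_zero, Nat.cast_inj]
    rw [pvTgt_char (pvFs st col) hs hne r i hi]
    tauto
  rw [hc, hgd, pvEmitAt, PySem.List.pyRange_one]
  have hn : (((pvCnt (pvFs st col) (pvRs mv col) i : Nat) : Int) + 1 - 1).toNat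
      = pvCnt (pvFs st col) (pvRs mv col) i := by omega
  rw [hn, List.map_map, List.map_map]
  apply List.map_congr_left
  intro k _
  simp only [Function.comp_apply, Prod.mk.injEq]
  refine ⟨by push_cast; ring, trivial⟩

theorem pvB_form (mv st : List (Int × Int)) (col : Int) :
    gravity_up_alt mv st col
      = PySem.Set.ofList ((pvEmitA (pvFs st col) 0 0 (pvRs mv col)).map (fun v => (v, col))) := by
  have hs := pvFs_pairwise st col
  have hne := pvFs_ne st col
  have hlen : 0 < (pvFs st col).length := List.length_pos_iff.2 hne
  show (PySem.List.enumerate (pvFs st col) 0).foldl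
      (fun res p =>
        (PySem.List.pyRange 1
          ((((((mv.filter (fun x => x.2 == col)).map (fun x => x.1)).filter (fun r =>
            ((p.1 == 0) || p.2 < r) &&
            ((p.1 + 1 == ((pvFs st col).length : Int)) || r ≤ PySem.List.pyGetD (pvFs st col) (p.1 + 1) 0))).length : Nat) : Int) + 1) 1).foldl
          (fun res k => PySem.Set.add res (p.2 + k, col)) res)
      PySem.Set.empty = _
  have hstep : (fun (res : PySem.Set (Int × Int)) (p : Int × Int) =>
        (PySem.List.pyRange 1
          ((((((mv.filter (fun x => x.2 == col)).map (fun x => x.1)).filter (fun r =>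
            ((p.1 == 0) || p.2 < r) &&
            ((p.1 + 1 == ((pvFs st col).length : Int)) || r ≤ PySem.List.pyGetD (pvFs st col) (p.1 + 1) 0))).length : Nat) : Int) + 1) 1).foldl
          (fun res k => PySem.Set.add res (p.2 + k, col)) res)
      = (fun res p => PySem.Set.update res
          ((PySem.List.pyRange 1
            ((((((mv.filter (fun x => x.2 == col)).map (fun x => x.1)).filter (fun r =>
              ((p.1 == 0) || p.2 < r) &&
              ((p.1 + 1 == ((pvFs st col).length : Int)) || r ≤ PySem.List.pyGetD (pvFs st col) (p.1 + 1) 0))).length : Nat) : Int) + 1) 1).map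
            (fun k => (p.2 + k, col)))) := by
    funext res p
    rw [PySem.Set.update_map_eq_foldl_add]
  rw [hstep, pvFoldlUpdate]
  have he : (PySem.Set.empty : PySem.Set (Int × Int)) = ([] : List (Int × Int)) := rfl
  rw [he, PySem.Set.update_nil_left]
  congr 1
  rw [PySem.List.enumerate_eq_map_pyRange (xs := pvFs st col) 0]
  have hl : PySem.List.len (pvFs st col) = ((pvFs st col).length : Int) := rfl
  rw [hl, PySem.List.pyRange_zero_nat]
  rw [List.flatMap_map, List.flatMap_map]
  rw [pvEmitA_eq (pvFs st col) hs hne (pvRs mv col) (pvRs_pairwise mv col) 0 0 hlen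
    (fun r _ => Nat.zero_le _)]
  have hrange : List.range (pvFs st col).length
      = 0 :: List.range' 1 ((pvFs st col).length - 1) := by
    rw [List.range_eq_range']
    cases h : (pvFs st col).length with
    | zero => omega
    | succ k => rw [List.range'_succ]; simp
  rw [hrange, List.flatMap_cons, List.map_append, List.map_flatMap]
  dsimp only
  have h0 := pvSlot_eq mv st col 0 hlen
  rw [h0]
  congr 1
  apply pvFlatMap_congr
  intro i hi
  rcases List.mem_range'.1 hi with ⟨k, hk, rfl⟩
  exact pvSlot_eq mv st col _ (by omega)

-- ===== VERDICT (by name: the statement is the Claim_ definition above) =====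
theorem gravity_up_spec : Claim_equal_gravity_up := by
  intro mv st col _
  unfold Spec_gravity_up
  rw [pvA_form, pvB_form]
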